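-- pv_equiv track=rewrite | github.com/jmsenosa/topic-extractor | eb-mw-topic-extractor/determine_nuisance_topics.py | nuisance_removal
-- ===== SOURCE A (Python) =====
-- def check_if_irregular_case(topic):
--
--     tokens = topic.split()
--     check = False
--
--     if topic[0].islower(): #first letter is lowercase
--         for token in tokens:
--             if token[0].isupper():
--                 check = True
--                 break
--     else:
--         for token in tokens:
--             if token[0].islower():
--                 check = True
--                 break
--     return check
--
-- def nuisance_removal(topics, nuisance_dict):
--     nuisance = [] #init
--     check_dictionary = False
--
--     if nuisance_dict:
--         check_dictionary = True
--
--     for topic in topics: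
--         if topic[0].islower() and check_if_irregular_case(topic):
--             nuisance.append(topic)
--
--         if check_dictionary and len(topic.split()) == 1:
--             try:
--                 if nuisance_dict[topic.lower()]:
--                     nuisance.append(topic)
--             except KeyError:
--                 pass
--     for n in nuisance:
--         topics.remove(n)
--
--     fin_topics = []
--     for topic in topics:
--         tokens = topic.split()
--         flag = False
--         cropped = ""
--         for token in tokens:
--
--             try:
--                 if nuisance_dict[token.lower()] == "NN" :
--                     flag = True
--                 else:
--                     if not flag: #just to make sure that it's still false, thus, if the flag became True, there's no way it will be False again. Fix to prevent the removal of nuisance words inside a valid topic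
--                         flag = False
--             except KeyError:
--                 flag = True
--             if flag:
--                 cropped = cropped +token + " "
--         try:
--             float(cropped.replace(' ', ''))
--         except ValueError:
--             if cropped: # to check if it's not blank
--                 fin_topics.append(cropped)
--             # fin_topics.append(temp_topic)
--
--         # for topic in fin_topics:
--     return fin_topics
-- ===== SOURCE B (Python) =====
-- def nuisance_removal(topics, nuisance_dict):
--     # Phase 1: delete nuisance topics in place, scanning indices backwards (no
--     # collect-then-remove pass).  A topic starting lowercase is nuisance iff some
--     # of its tokens starts uppercase; a single-token topic is nuisance iff the
--     # (non-empty) dictionary maps its lowercase form to a truthy value.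
--     for i in range(len(topics) - 1, -1, -1):
--         t = topics[i]
--         toks = t.split()
--         if (t[0].islower() and any(tok[0].isupper() for tok in toks)) \
--            or (nuisance_dict and len(toks) == 1 and nuisance_dict.get(t.lower())):
--             del topics[i]
--
--     # Phase 2: crop each surviving topic.  Walk the tokens right-to-left,
--     # accumulating the suffix string; whenever the current token is "bad"
--     # (absent from the dict or tagged NN) record the suffix built so far.
--     # The last recorded suffix is the one starting at the leftmost bad token.
--     fin_topics = []
--     for t in topics:
--         acc = ""
--         best = None
--         for tok in reversed(t.split()):
--             acc = tok + " " + acc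
--             if nuisance_dict.get(tok.lower(), "NN") == "NN":
--                 best = acc
--         if best is not None:
--             try:
--                 float(best.replace(' ', ''))
--             except ValueError:
--                 fin_topics.append(best)
--     return fin_topics
-- ===== Notes on version B (the rewrite author's own statement) =====
-- stated objective: alternative
-- what changed: Phase 1 drops A's collect-nuisance-list-then-list.remove scheme for a single backwards index sweep deleting in place (and eliminates the dead lowercase branch of the irregular check); phase 2 replaces A's left-to-right flag/accumulator loop by a right-to-left walk over the reversed tokens that builds the suffix back-to-front and records it at each bad token, the last recorded suffix being the crop.
import Mathlib
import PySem

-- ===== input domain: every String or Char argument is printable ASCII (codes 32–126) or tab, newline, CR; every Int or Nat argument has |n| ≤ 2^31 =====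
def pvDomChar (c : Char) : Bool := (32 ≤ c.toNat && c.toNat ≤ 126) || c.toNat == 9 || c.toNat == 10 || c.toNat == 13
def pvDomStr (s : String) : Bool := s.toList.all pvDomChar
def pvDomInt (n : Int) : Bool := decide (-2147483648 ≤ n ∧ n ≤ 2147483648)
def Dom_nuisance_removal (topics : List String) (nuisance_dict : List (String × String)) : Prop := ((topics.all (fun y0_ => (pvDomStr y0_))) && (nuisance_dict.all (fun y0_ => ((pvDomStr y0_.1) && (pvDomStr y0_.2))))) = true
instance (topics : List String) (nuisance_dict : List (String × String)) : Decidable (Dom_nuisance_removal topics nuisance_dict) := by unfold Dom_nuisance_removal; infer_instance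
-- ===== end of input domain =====

-- B deletes nuisance topics with a single backwards index sweep (no collect-then-remove pass)
-- and crops by walking each topic's tokens right-to-left, building the suffix back-to-front;
-- return-value equivalence only is proved here — both Pythons mutate `topics` in place the same
-- way (the nuisance entries are removed from it).

-- ===== shared primitive: hand port of Python's "does float(s) raise ValueError" test =====
-- (both Pythons call the builtin float(); exact for whitespace-free strings, which is all the
--  call sites pass: the tested string is a concatenation of split() tokens)
def pvDigTail : List Char → List Char
  | [] => []
  | c :: cs =>
    if c.isDigit then pvDigTail cs
    else if c == '_' then
      match cs with
      | d :: cs' => if d.isDigit then pvDigTail cs' else c :: d :: cs'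
      | [] => [c]
    else c :: cs

def pvDigRun (cs : List Char) : Bool × List Char :=
  match cs with
  | c :: r => if c.isDigit then (true, pvDigTail r) else (false, c :: r)
  | [] => (false, [])

def pvSkipSign : List Char → List Char
  | '+' :: r => r
  | '-' :: r => r
  | cs => cs

def pvExp (r : List Char) : Bool :=
  let p := pvDigRun (pvSkipSign r)
  p.1 && p.2.isEmpty

def pvFloatOk (cs : List Char) : Bool :=
  let cs := pvSkipSign cs
  let l := PySem.Chars.lower cs
  if l = ['i','n','f'] || l = ['i','n','f','i','n','i','t','y'] || l = ['n','a','n'] then true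
  else
    let p1 := pvDigRun cs
    let p2 := match p1.2 with
      | '.' :: r => pvDigRun r
      | r => (false, r)
    if !(p1.1 || p2.1) then false
    else match p2.2 with
      | [] => true
      | 'e' :: r => pvExp r
      | 'E' :: r => pvExp r
      | _ => false

-- s[0]; the ' ' default is reached only where Python raises IndexError (excluded by Pre_) or on
-- a split() token, which is never empty
def pvHead (s : String) : Char := (PySem.Str.pyGet? s 0).getD ' '

-- ===== PORT A =====
-- the two break-on-first-hit loops of check_if_irregular_case
def pvScanUpperA : List String → Bool
  | [] => false
  | tok :: rest => if PySem.Chars.isupper (pvHead tok) then true else pvScanUpperA rest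

def pvScanLowerA : List String → Bool
  | [] => false
  | tok :: rest => if PySem.Chars.islower (pvHead tok) then true else pvScanLowerA rest

def check_if_irregular_case (topic : String) : Bool :=
  let tokens := PySem.Str.split₀ topic
  if PySem.Chars.islower (pvHead topic) then pvScanUpperA tokens else pvScanLowerA tokens

-- the body of A's cropping loop (state = (flag, cropped))
def pvCropStepA (nuisance_dict : List (String × String)) (st : Bool × List Char) (token : String) : Bool × List Char :=
  let flag := match List.lookup (PySem.Str.lower token) nuisance_dict with
    | some v => if v = "NN" then true else st.1   -- flag stays true once true
    | none => true                                 -- KeyError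
  if flag then (flag, st.2 ++ token.toList ++ [' ']) else (flag, st.2)

def pvCollectA (nuisance_dict : List (String × String)) (topics : List String) : List String :=
  let check_dictionary := decide (nuisance_dict ≠ [])
  topics.foldl (fun acc topic =>
    let acc := if PySem.Chars.islower (pvHead topic) && check_if_irregular_case topic then acc ++ [topic] else acc
    if check_dictionary && ((PySem.Str.split₀ topic).length == 1) then
      match List.lookup (PySem.Str.lower topic) nuisance_dict with
      | some v => if v ≠ "" then acc ++ [topic] else acc   -- truthy value
      | none => acc                                         -- KeyError: pass
    else acc) []

-- A's removal loop `for n in nuisance: topics.remove(n)`;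
-- the `none` (ValueError) branch of remove? is unreachable (each entry is still present)
def pvRemoveAll (nuisance : List String) (topics : List String) : List String :=
  nuisance.foldl (fun ts n => (PySem.List.remove? ts n).getD ts) topics

def nuisance_removal (topics : List String) (nuisance_dict : List (String × String)) : List String :=
  (pvRemoveAll (pvCollectA nuisance_dict topics) topics).foldl (fun fin topic =>
    let tokens := PySem.Str.split₀ topic
    let st := tokens.foldl (pvCropStepA nuisance_dict) (false, ([] : List Char))
    if pvFloatOk (PySem.Chars.replace st.2 [' '] []) then fin
    else if st.2.isEmpty then fin else fin ++ [String.ofList st.2]) []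

-- ===== PORT B =====
-- B's inline deletion condition (named so the loop body stays one line)
def pvDropB (nuisance_dict : List (String × String)) (t : String) : Bool :=
  let toks := PySem.Str.split₀ t
  (PySem.Chars.islower (pvHead t) && toks.any (fun tok => PySem.Chars.isupper (pvHead tok))) ||
  (decide (nuisance_dict ≠ []) && (toks.length == 1) &&
    (((List.lookup (PySem.Str.lower t) nuisance_dict).getD "") != ""))

-- body of B's backwards sweep `t = topics[i]; if …: del topics[i]`
-- (the `none` branch is unreachable: descending indices stay in range after deletions)
def pvDelStep (nuisance_dict : List (String × String)) (ts : List String) (i : Int) : List String :=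
  match PySem.List.pyGet? ts i with
  | some t => if pvDropB nuisance_dict t then ts.eraseIdx i.toNat else ts
  | none => ts

-- nuisance_dict.get(tok.lower(), "NN") == "NN"
def pvBadTok (nuisance_dict : List (String × String)) (tok : String) : Bool :=
  ((List.lookup (PySem.Str.lower tok) nuisance_dict).getD "NN") == "NN"

-- body of B's right-to-left crop loop (state = (acc, best))
def pvCropStepB (nuisance_dict : List (String × String)) (st : List Char × Option (List Char)) (tok : String) : List Char × Option (List Char) :=
  let acc := tok.toList ++ [' '] ++ st.1
  (acc, if pvBadTok nuisance_dict tok then some acc else st.2)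

def nuisance_removal_alt (topics : List String) (nuisance_dict : List (String × String)) : List String :=
  let topics := (PySem.List.pyRange ((topics.length : Int) - 1) (-1) (-1)).foldl (pvDelStep nuisance_dict) topics
  topics.foldl (fun fin t =>
    let st := ((PySem.Str.split₀ t).reverse).foldl (pvCropStepB nuisance_dict) ([], none)
    match st.2 with
    | some best => if pvFloatOk (PySem.Chars.replace best [' '] []) then fin else fin ++ [String.ofList best]
    | none => fin) []

-- ===== PRECONDITION & SPEC =====
-- Pre_ excludes exactly the inputs where Python A raises: an empty-string topic makes topic[0]
-- raise IndexError (B raises there too).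
def Pre_nuisance_removal (topics : List String) (_nuisance_dict : List (String × String)) : Prop :=
  ∀ t ∈ topics, t ≠ ""
instance (topics : List String) (nuisance_dict : List (String × String)) : Decidable (Pre_nuisance_removal topics nuisance_dict) := by unfold Pre_nuisance_removal; infer_instance

def pvWitness_nuisance_removal : List String × (List (String × String)) :=
  (["Dog House", "the cat", "nn"], [("nn", "NN"), ("house", "VB")])

def Spec_nuisance_removal (topics : List String) (nuisance_dict : List (String × String)) (out : List String) : Prop := out = nuisance_removal_alt topics nuisance_dict
instance (topics : List String) (nuisance_dict : List (String × String)) (out : List String) : Decidable (Spec_nuisance_removal topics nuisance_dict out) := by unfold Spec_nuisance_removal; infer_instance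

-- ===== CLAIM (what is proved, stated in full; the proofs are below) =====
def Claim_equal_nuisance_removal : Prop := ∀ (topics : List String) (nuisance_dict : List (String × String)), Dom_nuisance_removal topics nuisance_dict → Pre_nuisance_removal topics nuisance_dict → Spec_nuisance_removal topics nuisance_dict (nuisance_removal topics nuisance_dict)

-- ===== LEMMAS AND PROOFS =====

theorem pv_islower_not_isupper (c : Char) (h : PySem.Chars.islower c = true) : PySem.Chars.isupper c = false := by
  simp only [PySem.Chars.islower, Bool.and_eq_true, decide_eq_true_eq, Char.le_def] at h
  have h1n : 97 ≤ c.val.toNat := by exact_mod_cast h.1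
  simp only [PySem.Chars.isupper, Bool.and_eq_false_iff, decide_eq_false_iff_not, Char.le_def]
  right
  intro hZ
  have hZn : c.val.toNat ≤ 90 := by exact_mod_cast hZ
  omega

theorem pv_islower_not_isspace (c : Char) (h : PySem.Chars.islower c = true) : PySem.Chars.isspace c = false := by
  simp only [PySem.Chars.islower, Bool.and_eq_true, decide_eq_true_eq, Char.le_def] at h
  have h1n : 97 ≤ c.val.toNat := by exact_mod_cast h.1
  have h2n : c.val.toNat ≤ 122 := by exact_mod_cast h.2
  simp only [PySem.Chars.isspace, Char.toNat, Bool.or_eq_false_iff, Bool.and_eq_false_iff, decide_eq_false_iff_not]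
  omega

theorem pv_go_shape (rest : List Char) : ∀ (cur : List Char) (acc : List (List Char)),
    ∃ ws, PySem.Chars.split₀.go rest cur acc = acc.reverse ++ ws ∧
      (cur ≠ [] → ∃ t ws', ws = (cur.reverse ++ t) :: ws') := by
  induction rest with
  | nil =>
    intro cur acc
    by_cases hc : cur = []
    · subst hc
      exact ⟨[], by simp [PySem.Chars.split₀.go], by simp⟩
    · refine ⟨[cur.reverse], ?_, ?_⟩
      · simp [PySem.Chars.split₀.go, List.isEmpty_iff, hc]
      · intro _; exact ⟨[], [], by simp⟩
  | cons c rest ih =>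
    intro cur acc
    by_cases hs : PySem.Chars.isspace c = true
    · by_cases hc : cur = []
      · subst hc
        obtain ⟨ws, hgo, _⟩ := ih [] acc
        refine ⟨ws, ?_, ?_⟩
        · simp [PySem.Chars.split₀.go, hs, hgo]
        · intro h; exact absurd rfl h
      · obtain ⟨ws, hgo, _⟩ := ih [] (cur.reverse :: acc)
        refine ⟨cur.reverse :: ws, ?_, ?_⟩
        · simp [PySem.Chars.split₀.go, hs, List.isEmpty_iff, hc, hgo]
        · intro _; exact ⟨[], ws, by simp⟩
    · obtain ⟨ws, hgo, hne⟩ := ih (c :: cur) acc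
      obtain ⟨t, ws', hws⟩ := hne (by simp)
      refine ⟨ws, ?_, ?_⟩
      · simp [PySem.Chars.split₀.go, hs, hgo]
      · intro _
        exact ⟨c :: t, ws', by simp [hws]⟩

theorem pv_first_word (c : Char) (rest : List Char) (hs : PySem.Chars.isspace c = false) :
    ∃ t ws, PySem.Chars.split₀ (c :: rest) = (c :: t) :: ws := by
  obtain ⟨ws, hgo, hne⟩ := pv_go_shape rest [c] []
  obtain ⟨t, ws', hws⟩ := hne (by simp)
  refine ⟨t, ws', ?_⟩
  simp only [PySem.Chars.split₀, PySem.Chars.split₀.go, hs]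
  simp at hgo
  simp [hgo, hws]

theorem pv_head_cons (s : String) (c : Char) (rest : List Char) (h : s.toList = c :: rest) :
    pvHead s = c := by
  simp [pvHead, PySem.Str.pyGet?, PySem.Chars.pyGet?, PySem.List.pyGet?, PySem.List.pyIdx?, h]

-- A topic whose first character is a lowercase letter and which splits into a single token is
-- never "irregular": the single token starts with that same lowercase character.
theorem pv_disjoint (t : String) (h1 : PySem.Chars.islower (pvHead t) = true)
    (h2 : (PySem.Str.split₀ t).length = 1) : check_if_irregular_case t = false := by
  cases ht : t.toList with
  | nil =>
    exfalso
    have : pvHead t = ' ' := by simp [pvHead, PySem.Str.pyGet?, PySem.Chars.pyGet?, PySem.List.pyGet?, PySem.List.pyIdx?, ht]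
    rw [this] at h1
    simp [PySem.Chars.islower] at h1
  | cons c rest =>
    have hc : pvHead t = c := pv_head_cons t c rest ht
    rw [hc] at h1
    obtain ⟨tl, ws, hsp⟩ := pv_first_word c rest (pv_islower_not_isspace c h1)
    have hsp' : PySem.Str.split₀ t = ((c :: tl) :: ws).map String.ofList := by
      simp [PySem.Str.split₀, ht, hsp]
    have hws : ws = [] := by
      rw [hsp'] at h2
      simpa using h2
    subst hws
    simp only [check_if_irregular_case, hsp', hc, h1, if_true, List.map_cons, List.map_nil]
    have hhead : pvHead (String.ofList (c :: tl)) = c :=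
      pv_head_cons _ c tl (by simp)
    simp [pvScanUpperA, hhead, pv_islower_not_isupper c h1]

theorem pv_scanUpper_eq_any (ts : List String) :
    pvScanUpperA ts = ts.any (fun tok => PySem.Chars.isupper (pvHead tok)) := by
  induction ts with
  | nil => rfl
  | cons tok rest ih => by_cases h : PySem.Chars.isupper (pvHead tok) <;> simp [pvScanUpperA, h, ih]

-- A's first condition equals B's (B drops the dead lowercase branch of the irregular check)
theorem pv_condA_eq (t : String) :
    (PySem.Chars.islower (pvHead t) && check_if_irregular_case t) =
    (PySem.Chars.islower (pvHead t) && (PySem.Str.split₀ t).any (fun tok => PySem.Chars.isupper (pvHead tok))) := by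
  by_cases h : PySem.Chars.islower (pvHead t) = true
  · simp only [Bool.true_and, check_if_irregular_case, h, if_true, pv_scanUpper_eq_any]
  · rw [Bool.not_eq_true] at h
    simp [h]

-- a fold that appends per-element blocks of 0/1 copies is a filter
theorem pv_foldl_filter_gen (f : List String → String → List String) (p : String → Bool)
    (hf : ∀ a x, f a x = a ++ (if p x then [x] else [])) :
    ∀ (l : List String) (acc : List String), l.foldl f acc = acc ++ l.filter p := by
  intro l
  induction l with
  | nil => intro acc; simp
  | cons x r ih =>
    intro acc
    rw [List.foldl_cons, hf, ih, List.filter_cons]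
    by_cases hp : p x = true <;> simp [hp]

-- phase 1, A side: the collect loop produces exactly the pvDropB filter
theorem pv_collectA_eq (nuisance_dict : List (String × String)) (topics : List String) :
    pvCollectA nuisance_dict topics = topics.filter (pvDropB nuisance_dict) := by
  have h := pv_foldl_filter_gen
    (fun acc topic =>
      let acc := if PySem.Chars.islower (pvHead topic) && check_if_irregular_case topic then acc ++ [topic] else acc
      if decide (nuisance_dict ≠ []) && ((PySem.Str.split₀ topic).length == 1) then
        match List.lookup (PySem.Str.lower topic) nuisance_dict with
        | some v => if v ≠ "" then acc ++ [topic] else acc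
        | none => acc
      else acc)
    (pvDropB nuisance_dict) ?_ topics []
  · simpa [pvCollectA] using h
  intro a x
  dsimp only
  by_cases hc1 : (PySem.Chars.islower (pvHead x) && check_if_irregular_case x) = true
  · have hlen : ((PySem.Str.split₀ x).length == 1) = false := by
      rw [Bool.and_eq_true] at hc1
      rw [beq_eq_false_iff_ne]
      intro h1
      have hd := pv_disjoint x hc1.1 h1
      have h2 := hc1.2
      rw [hd] at h2
      exact Bool.false_ne_true h2
    have hirr := pv_condA_eq x
    rw [hc1] at hirr
    simp [pvDropB, hc1, hlen, ← hirr]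
  · rw [Bool.not_eq_true] at hc1
    have hirr := pv_condA_eq x
    rw [hc1] at hirr
    have hdb : pvDropB nuisance_dict x =
        (decide (nuisance_dict ≠ []) && ((PySem.Str.split₀ x).length == 1) &&
          (((List.lookup (PySem.Str.lower x) nuisance_dict).getD "") != "")) := by
      simp only [pvDropB, ← hirr, Bool.false_or]
    cases hcd : (decide (nuisance_dict ≠ []) && ((PySem.Str.split₀ x).length == 1)) with
    | false =>
      simp [hdb, hc1]
      intro h1 h2
      exact absurd hcd (by simp [h1, h2])
    | true =>
      cases hl : List.lookup (PySem.Str.lower x) nuisance_dict with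
      | none => simp [hdb, hl, hc1]
      | some v =>
        by_cases hv : v = ""
        · subst hv; simp [hdb, hl, hc1]
        · simp [hdb, hl, hc1, hv]
          simpa using hcd

-- removing a value absent from the head leaves the head in place
theorem pv_removeAll_cons (ns : List String) : ∀ (ts : List String) (x : String),
    (∀ n ∈ ns, n ≠ x) → pvRemoveAll ns (x :: ts) = x :: pvRemoveAll ns ts := by
  induction ns with
  | nil => intro ts x _; rfl
  | cons n ns ih =>
    intro ts x hne
    have hx : x ≠ n := fun h => hne n (by simp) h.symm
    have hstep : (PySem.List.remove? (x :: ts) n).getD (x :: ts) = x :: (PySem.List.remove? ts n).getD ts := by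
      rw [PySem.List.remove?_cons_of_ne ts hx]
      cases h : PySem.List.remove? ts n <;> simp
    show pvRemoveAll ns ((PySem.List.remove? (x :: ts) n).getD (x :: ts)) = x :: pvRemoveAll ns ((PySem.List.remove? ts n).getD ts)
    rw [hstep]
    exact ih _ x (fun m hm => hne m (by simp [hm]))

-- phase 1, A side: removing every element of `l.filter p` from `l` keeps exactly the non-p ones
theorem pv_removeAll_filter (p : String → Bool) : ∀ (l : List String),
    pvRemoveAll (l.filter p) l = l.filter (fun t => !p t) := by
  intro l
  induction l with
  | nil => rfl
  | cons x r ih =>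
    by_cases hp : p x = true
    · have hstep : pvRemoveAll (x :: r.filter p) (x :: r) = pvRemoveAll (r.filter p) r := by
        show pvRemoveAll (r.filter p) ((PySem.List.remove? (x :: r) x).getD (x :: r)) = _
        rw [PySem.List.remove?_cons_self]
        rfl
      simp [hp, hstep, ih]
    · rw [Bool.not_eq_true] at hp
      have hne : ∀ n ∈ r.filter p, n ≠ x := by
        intro n hn hnx
        subst hnx
        rw [List.mem_filter] at hn
        rw [hp] at hn
        exact Bool.false_ne_true hn.2
      simp [hp, pv_removeAll_cons _ r x hne, ih]

-- descending in-range indices: the trailing element is untouched until its own index comes up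
theorem pv_delApp (nuisance_dict : List (String × String)) : ∀ (idxs : List Int),
    idxs.Pairwise (· > ·) → ∀ (l : List String) (x : String),
    (∀ i ∈ idxs, 0 ≤ i ∧ i < (l.length : Int)) →
    idxs.foldl (pvDelStep nuisance_dict) (l ++ [x]) = idxs.foldl (pvDelStep nuisance_dict) l ++ [x] := by
  intro idxs
  induction idxs with
  | nil => intro _ l x _; rfl
  | cons i rest ih =>
    intro hpw l x hbd
    have hi := hbd i (by simp)
    have hiN : i.toNat < l.length := by omega
    have hget : PySem.List.pyGet? (l ++ [x]) i = some l[i.toNat] := by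
      rw [PySem.List.pyGet?_of_nonneg _ hi.1, List.getElem?_append_left hiN,
        List.getElem?_eq_getElem hiN]
    have hgetl : PySem.List.pyGet? l i = some l[i.toNat] := by
      rw [PySem.List.pyGet?_of_nonneg _ hi.1, List.getElem?_eq_getElem hiN]
    rw [List.pairwise_cons] at hpw
    rw [List.foldl_cons, List.foldl_cons]
    by_cases hd : pvDropB nuisance_dict l[i.toNat] = true
    · have h1 : pvDelStep nuisance_dict (l ++ [x]) i = l.eraseIdx i.toNat ++ [x] := by
        simp [pvDelStep, hget, hd, List.eraseIdx_append_of_lt_length hiN [x]]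
      have h2 : pvDelStep nuisance_dict l i = l.eraseIdx i.toNat := by
        simp [pvDelStep, hgetl, hd]
      rw [h1, h2]
      refine ih hpw.2 _ x ?_
      intro j hj
      have hji := hpw.1 j hj
      have hjb := hbd j (by simp [hj])
      constructor
      · exact hjb.1
      · rw [List.length_eraseIdx_of_lt hiN]
        omega
    · rw [Bool.not_eq_true] at hd
      have h1 : pvDelStep nuisance_dict (l ++ [x]) i = l ++ [x] := by
        simp [pvDelStep, hget, hd]
      have h2 : pvDelStep nuisance_dict l i = l := by
        simp [pvDelStep, hgetl, hd]
      rw [h1, h2]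
      refine ih hpw.2 l x ?_
      intro j hj
      exact hbd j (by simp [hj])

-- phase 1, B side: the backwards deletion sweep is the same filter
theorem pv_delAll (nuisance_dict : List (String × String)) : ∀ (l : List String),
    (PySem.List.pyRange ((l.length : Int) - 1) (-1) (-1)).foldl (pvDelStep nuisance_dict) l =
      l.filter (fun t => !pvDropB nuisance_dict t) := by
  intro l
  induction l using List.reverseRecOn with
  | nil =>
    rw [PySem.List.pyRange_neg_one_eq_nil (by norm_num)]
    rfl
  | append_singleton l x ih =>
    have hlen : ((l ++ [x]).length : Int) - 1 = (l.length : Int) := by simp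
    rw [hlen, PySem.List.pyRange_neg_one_cons (by omega), List.foldl_cons]
    have hget : PySem.List.pyGet? (l ++ [x]) (l.length : Int) = some x :=
      PySem.List.pyGet?_append_length l ([] : List String) x
    have hpw : (PySem.List.pyRange ((l.length : Int) - 1) (-1) (-1)).Pairwise (· > ·) := by
      rw [PySem.List.pyRange_neg_one_eq_reverse, List.pairwise_reverse]
      exact PySem.List.pairwise_lt_pyRange_one _ _
    have hbd : ∀ i ∈ PySem.List.pyRange ((l.length : Int) - 1) (-1) (-1), 0 ≤ i ∧ i < (l.length : Int) := by
      intro i hi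
      rw [PySem.List.mem_pyRange_neg_one] at hi
      omega
    by_cases hd : pvDropB nuisance_dict x = true
    · have h1 : pvDelStep nuisance_dict (l ++ [x]) (l.length : Int) = l := by
        simp [pvDelStep, hd]
        rw [List.eraseIdx_append_of_length_le (le_refl _)]
        simp
      rw [h1, ih]
      simp [List.filter_append, hd]
    · rw [Bool.not_eq_true] at hd
      have h1 : pvDelStep nuisance_dict (l ++ [x]) (l.length : Int) = l ++ [x] := by
        simp [pvDelStep, hd]
      rw [h1, pv_delApp nuisance_dict _ hpw l x hbd, ih]
      simp [List.filter_append, hd]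

-- A's crop fold once the flag is raised: everything from here on is appended
theorem pv_crop_true (nuisance_dict : List (String × String)) (toks : List String) :
    ∀ c : List Char, toks.foldl (pvCropStepA nuisance_dict) (true, c) =
      (true, c ++ toks.flatMap (fun t => t.toList ++ [' '])) := by
  induction toks with
  | nil => intro c; simp
  | cons t r ih =>
    intro c
    rw [List.foldl_cons]
    have hstep : pvCropStepA nuisance_dict (true, c) t = (true, c ++ t.toList ++ [' ']) := by
      unfold pvCropStepA
      cases hl : List.lookup (PySem.Str.lower t) nuisance_dict with
      | none => simp
      | some v => by_cases hv : v = "NN" <;> simp [hv]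
    rw [hstep, ih]
    simp

theorem pv_step_false (nuisance_dict : List (String × String)) (t : String) :
    pvCropStepA nuisance_dict (false, ([] : List Char)) t =
      if pvBadTok nuisance_dict t then (true, t.toList ++ [' ']) else (false, []) := by
  unfold pvCropStepA
  cases hl : List.lookup (PySem.Str.lower t) nuisance_dict with
  | none => simp [pvBadTok, hl]
  | some v =>
    by_cases hv : v = "NN"
    · subst hv; simp [pvBadTok, hl]
    · have hb : (v == "NN") = false := by simpa using hv
      simp [pvBadTok, hl, hv, hb]

-- A's crop fold = suffix from the first bad token
theorem pv_crop_main (nuisance_dict : List (String × String)) (toks : List String) :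
    toks.foldl (pvCropStepA nuisance_dict) (false, ([] : List Char)) =
      (decide (toks.findIdx (pvBadTok nuisance_dict) < toks.length),
       (toks.drop (toks.findIdx (pvBadTok nuisance_dict))).flatMap (fun t => t.toList ++ [' '])) := by
  induction toks with
  | nil => simp
  | cons t r ih =>
    rw [List.foldl_cons, pv_step_false]
    cases hb : pvBadTok nuisance_dict t with
    | true =>
      have hf : List.findIdx (pvBadTok nuisance_dict) (t :: r) = 0 := by
        simp [List.findIdx_cons, hb]
      rw [if_pos rfl, pv_crop_true, hf]
      simp
    | false =>
      have hf : List.findIdx (pvBadTok nuisance_dict) (t :: r) = List.findIdx (pvBadTok nuisance_dict) r + 1 := by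
        simp [List.findIdx_cons, hb]
      rw [if_neg (by simp), ih, hf]
      simp only [List.drop_succ_cons, List.length_cons, Nat.add_lt_add_iff_right]

-- B's crop fold over the reversed tokens, characterised through the same (findIdx, drop) form
theorem pv_cropB_main (nuisance_dict : List (String × String)) (toks : List String) :
    toks.reverse.foldl (pvCropStepB nuisance_dict) (([] : List Char), (none : Option (List Char))) =
      (toks.flatMap (fun t => t.toList ++ [' ']),
       if toks.findIdx (pvBadTok nuisance_dict) < toks.length then
         some ((toks.drop (toks.findIdx (pvBadTok nuisance_dict))).flatMap (fun t => t.toList ++ [' ']))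
       else none) := by
  rw [List.foldl_reverse]
  induction toks with
  | nil => simp
  | cons t r ih =>
    rw [List.foldr_cons, ih]
    unfold pvCropStepB
    cases hb : pvBadTok nuisance_dict t with
    | true =>
      have hf : List.findIdx (pvBadTok nuisance_dict) (t :: r) = 0 := by
        simp [List.findIdx_cons, hb]
      simp [hf]
    | false =>
      have hf : List.findIdx (pvBadTok nuisance_dict) (t :: r) = List.findIdx (pvBadTok nuisance_dict) r + 1 := by
        simp [List.findIdx_cons, hb]
      simp only [hf, List.drop_succ_cons, List.length_cons, Nat.add_lt_add_iff_right]
      simp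

theorem pv_flatMap_ne_nil (l : List String) (h : l ≠ []) :
    l.flatMap (fun t => t.toList ++ [' ']) ≠ [] := by
  cases l with
  | nil => exact absurd rfl h
  | cons t r => simp

-- the two per-topic crop bodies coincide
theorem pv_crop_body (nuisance_dict : List (String × String)) (fin : List String) (topic : String) :
    (let tokens := PySem.Str.split₀ topic
     let st := tokens.foldl (pvCropStepA nuisance_dict) (false, ([] : List Char))
     if pvFloatOk (PySem.Chars.replace st.2 [' '] []) then fin
     else if st.2.isEmpty then fin else fin ++ [String.ofList st.2]) =
    (let st := ((PySem.Str.split₀ topic).reverse).foldl (pvCropStepB nuisance_dict) ([], none)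
     match st.2 with
     | some best => if pvFloatOk (PySem.Chars.replace best [' '] []) then fin else fin ++ [String.ofList best]
     | none => fin) := by
  simp only [pv_crop_main, pv_cropB_main]
  by_cases hi : (PySem.Str.split₀ topic).findIdx (pvBadTok nuisance_dict) < (PySem.Str.split₀ topic).length
  · have hdrop : (PySem.Str.split₀ topic).drop ((PySem.Str.split₀ topic).findIdx (pvBadTok nuisance_dict)) ≠ [] := by
      intro hdnil
      rw [List.drop_eq_nil_iff] at hdnil
      omega
    have hC := pv_flatMap_ne_nil _ hdrop
    simp only [hi, if_true]
    by_cases hf : pvFloatOk (PySem.Chars.replace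
        (((PySem.Str.split₀ topic).drop ((PySem.Str.split₀ topic).findIdx (pvBadTok nuisance_dict))).flatMap
          (fun t => t.toList ++ [' '])) [' '] []) = true
    · simp [hf]
    · simp only [hf, List.isEmpty_iff]
      simp [hC]
  · have hdrop : (PySem.Str.split₀ topic).drop ((PySem.Str.split₀ topic).findIdx (pvBadTok nuisance_dict)) = [] :=
      List.drop_eq_nil_of_le (by omega)
    simp [hi, hdrop, pvFloatOk, pvSkipSign, PySem.Chars.replace, PySem.Chars.lower, pvDigRun]

theorem pv_main (topics : List String) (nuisance_dict : List (String × String)) :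
    nuisance_removal topics nuisance_dict = nuisance_removal_alt topics nuisance_dict := by
  unfold nuisance_removal nuisance_removal_alt
  rw [pv_collectA_eq, pv_removeAll_filter, pv_delAll]
  congr 1
  funext fin topic
  exact pv_crop_body nuisance_dict fin topic

-- ===== VERDICT (by name: the statement is the Claim_ definition above) =====
theorem nuisance_removal_spec : Claim_equal_nuisance_removal := by
  intro topics nuisance_dict _ _
  unfold Spec_nuisance_removal
  exact pv_main topics nuisance_dict
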